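-- pv_equiv track=rewrite | github.com/parthjpatel99/Bctci-code-solutions | grids and matrices/queens_reach.py | safe_cells
-- ===== SOURCE A (Python) =====
-- def safe_cells(board):
--     res = [[0] * len(board[0]) for _ in range(len(board))]
--
--     def mark_cell_reachable(r, c):
--         def isValid(r,c):
--             return 0 <= r < len(board) and 0 <= c < len(board[0]) and board[r][c] == 0
--
--         directions = [[1, 0], [0, 1], [-1, 0], [0, -1], [-1, -1], [-1, 1], [1, -1], [1, 1]]
--
--         for dir_r, dir_c in directions:
--             newR = r + dir_r
--             newC = c + dir_c
--
--             while isValid(newR, newC):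
--                 res[newR][newC] = 1
--                 newR += dir_r
--                 newC += dir_c
--
--
--     for r in range(len(board)):
--         for c in range(len(board[0])):
--             if board[r][c] == 1:
--                 res[r][c] = 1
--                 mark_cell_reachable(r, c)
--
--     return res
-- ===== SOURCE B (Python) =====
-- def safe_cells(board):
--     R = len(board)
--     C = len(board[0])
--
--     def attacked(r, c):
--         # walk outward from (r, c) in each direction, skipping empty cells;
--         # attacked iff the first non-empty cell hit (if any) holds a queen
--         for dr, dc in ((1, 0), (0, 1), (-1, 0), (0, -1),
--                        (-1, -1), (-1, 1), (1, -1), (1, 1)):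
--             rr, cc = r + dr, c + dc
--             while 0 <= rr < R and 0 <= cc < C and board[rr][cc] == 0:
--                 rr += dr
--                 cc += dc
--             if 0 <= rr < R and 0 <= cc < C and board[rr][cc] == 1:
--                 return True
--         return False
--
--     return [[1 if board[r][c] == 1 or (board[r][c] == 0 and attacked(r, c)) else 0
--              for c in range(C)]
--             for r in range(R)]
-- ===== Notes on version B (the rewrite author's own statement) =====
-- stated objective: alternative
-- what changed: B replaces A's per-queen scatter (mutating res along rays out of every queen) with a per-cell functional gather: for each cell it walks outward in the 8 directions skipping empty cells and marks the cell iff the first non-empty cell hit is a queen; the output is built directly by a comprehension with no mutation.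
-- outside the precondition, e.g. on safe_cells([]): A returns [], B raises IndexError
import Mathlib
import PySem

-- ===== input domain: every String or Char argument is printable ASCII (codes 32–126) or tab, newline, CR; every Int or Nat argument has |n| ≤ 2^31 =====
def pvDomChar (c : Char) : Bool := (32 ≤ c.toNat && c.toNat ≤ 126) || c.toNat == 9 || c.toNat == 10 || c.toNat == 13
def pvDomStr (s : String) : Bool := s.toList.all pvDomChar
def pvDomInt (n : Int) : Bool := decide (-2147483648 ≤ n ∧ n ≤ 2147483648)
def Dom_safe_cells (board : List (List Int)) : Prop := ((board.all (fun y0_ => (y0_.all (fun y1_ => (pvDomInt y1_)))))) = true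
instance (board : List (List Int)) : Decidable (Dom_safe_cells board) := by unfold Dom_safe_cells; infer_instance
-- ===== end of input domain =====

-- B replaces A's per-queen mutating ray-scatter with a per-cell functional gather
-- (walk outward from each cell; attacked iff the first non-empty cell hit is a queen):
-- objective "alternative" — no in-place mutation, output built directly; return values equal.

-- ===== PORT A =====
-- A mutates the local list `res` in place; the port threads the grid functionally
-- (the caller never observes the mutation: `res` is created inside A).
-- res[r][c] = 1   (every write in A has 0 ≤ r < len(res), 0 ≤ c < len(res[r]): exact there)
def pvSet1 (g : List (List Int)) (r c : Int) : List (List Int) :=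
  g.set r.toNat ((g.getD r.toNat []).set c.toNat 1)

-- board[r][c]   (every read in A has 0 ≤ r, 0 ≤ c, r < len(board), c < len(board[0]):
-- exact wherever Python does not raise, i.e. on Pre_)
def pvGetA (board : List (List Int)) (r c : Int) : Int :=
  (board.getD r.toNat []).getD c.toNat 0

def pvIsValid (board : List (List Int)) (r c : Int) : Bool :=
  decide (0 ≤ r) && decide (r < (board.length : Int)) &&
  decide (0 ≤ c) && decide (c < ((board.headD []).length : Int)) &&
  (pvGetA board r c == 0)

def pvDirections : List (Int × Int) :=
  [(1,0), (0,1), (-1,0), (0,-1), (-1,-1), (-1,1), (1,-1), (1,1)]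

-- fuel for A's while loop: the guard keeps both coordinates inside [0,R)×[0,C) and one
-- of them moves by ±1 each step, so the loop runs < R + C + 2 times; the fueled
-- recursion therefore computes exactly what the Python while loop computes.
def pvFuel (board : List (List Int)) : Nat :=
  board.length + (board.headD []).length + 2

def pvRay (board : List (List Int)) (dr dc : Int) :
    Nat → Int → Int → List (List Int) → List (List Int)
  | 0, _, _, res => res
  | fuel+1, r, c, res =>
    if pvIsValid board (r + dr) (c + dc) then
      pvRay board dr dc fuel (r + dr) (c + dc) (pvSet1 res (r + dr) (c + dc))
    else res

def pvMarkReach (board : List (List Int)) (res : List (List Int)) (r c : Int) :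
    List (List Int) :=
  pvDirections.foldl (fun res d => pvRay board d.1 d.2 (pvFuel board) r c res) res

def safe_cells (board : List (List Int)) : List (List Int) :=
  (List.range board.length).foldl (fun res (r : Nat) =>
    (List.range (board.headD []).length).foldl (fun res (c : Nat) =>
      if pvGetA board (r : Int) (c : Int) = 1 then
        pvMarkReach board (pvSet1 res (r : Int) (c : Int)) (r : Int) (c : Int)
      else res) res)
    (List.replicate board.length (List.replicate (board.headD []).length (0 : Int)))

-- ===== PORT B =====
-- board[rr][cc]   (same guard discipline as in Source B: exact on Pre_)
def pvCellB (board : List (List Int)) (r c : Int) : Int :=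
  (board.getD r.toNat []).getD c.toNat 0

-- 0 <= r < R and 0 <= c < C
def pvInB (R C r c : Int) : Bool :=
  decide (0 ≤ r) && decide (r < R) && decide (0 ≤ c) && decide (c < C)

-- the while loop of attacked: skip empty cells along (dr, dc); fuel as for A's loop
def pvWalk (board : List (List Int)) (R C dr dc : Int) :
    Nat → Int → Int → Int × Int
  | 0, rr, cc => (rr, cc)
  | fuel+1, rr, cc =>
    if pvInB R C rr cc && (pvCellB board rr cc == 0) then
      pvWalk board R C dr dc fuel (rr + dr) (cc + dc)
    else (rr, cc)

def pvAttacked (board : List (List Int)) (R C : Int) (fuel : Nat) (r c : Int) : Bool :=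
  [((1:Int),(0:Int)), (0,1), (-1,0), (0,-1), (-1,-1), (-1,1), (1,-1), (1,1)].any fun d =>
    let p := pvWalk board R C d.1 d.2 fuel (r + d.1) (c + d.2)
    pvInB R C p.1 p.2 && (pvCellB board p.1 p.2 == 1)

def safe_cells_alt (board : List (List Int)) : List (List Int) :=
  (List.range board.length).map fun (r : Nat) =>
    (List.range (board.headD []).length).map fun (c : Nat) =>
      if pvCellB board (r : Int) (c : Int) = 1 ∨
         (pvCellB board (r : Int) (c : Int) = 0 ∧
          pvAttacked board (board.length : Int) ((board.headD []).length : Int)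
            (board.length + (board.headD []).length + 2) (r : Int) (c : Int) = true)
      then (1 : Int) else 0

-- ===== PRECONDITION & SPEC =====
-- Pre_ excludes the boards on which some board[r][c]/board[0] access raises IndexError:
-- boards where a row is shorter than board[0], and the empty board — on [] A's lazy
-- comprehension happens to return [] while B, which evaluates len(board[0]) up front,
-- raises IndexError there itself.
def Pre_safe_cells (board : List (List Int)) : Prop :=
  board ≠ [] ∧ ∀ row ∈ board, (board.headD []).length ≤ row.length
instance (board : List (List Int)) : Decidable (Pre_safe_cells board) := by
  unfold Pre_safe_cells; infer_instance

def pvWitness_safe_cells : List (List Int) := [[1, 0], [0, 0]]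

def Spec_safe_cells (board : List (List Int)) (out : List (List Int)) : Prop :=
  out = safe_cells_alt board
instance (board : List (List Int)) (out : List (List Int)) :
    Decidable (Spec_safe_cells board out) := by unfold Spec_safe_cells; infer_instance

-- ===== CLAIM (what is proved, stated in full; the proofs are below) =====
def Claim_equal_safe_cells : Prop :=
  ∀ (board : List (List Int)), Dom_safe_cells board → Pre_safe_cells board →
    Spec_safe_cells board (safe_cells board)

-- ===== LEMMAS AND PROOFS =====

-- entry (x, y) of a grid, 0 outside
def pvEnt (g : List (List Int)) (x y : Nat) : Int := (g.getD x []).getD y 0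

-- the grid has shape R × C
def pvDims (R C : Nat) (g : List (List Int)) : Prop :=
  g.length = R ∧ ∀ row ∈ g, row.length = C

-- the (propositional) guard of both while loops
def pvCond (board : List (List Int)) (r c : Int) : Prop :=
  0 ≤ r ∧ r < (board.length : Int) ∧ 0 ≤ c ∧ c < ((board.headD []).length : Int) ∧
    pvGetA board r c = 0

-- the ray from (r, c) along (dr, dc) marks (x, y) within fuel steps
def pvRayHit (board : List (List Int)) (r c dr dc : Int) (x y : Nat) (fuel : Nat) : Prop :=
  ∃ k : Nat, 1 ≤ k ∧ k ≤ fuel ∧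
    (∀ j : Nat, 1 ≤ j → j ≤ k → pvCond board (r + j * dr) (c + j * dc)) ∧
    (x : Int) = r + k * dr ∧ (y : Int) = c + k * dc

-- cell (r, c) sees a queen along direction d (first non-empty cell in that direction)
def pvSees (board : List (List Int)) (r c : Int) (d : Int × Int) : Prop :=
  ∃ k : Nat, 1 ≤ k ∧
    (0 ≤ r + k * d.1 ∧ r + k * d.1 < (board.length : Int) ∧
     0 ≤ c + k * d.2 ∧ c + k * d.2 < ((board.headD []).length : Int)) ∧
    pvGetA board (r + k * d.1) (c + k * d.2) = 1 ∧
    ∀ j : Nat, 1 ≤ j → j < k → pvCond board (r + j * d.1) (c + j * d.2)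

-- cell (x, y) is marked by A's full pass
def pvMarkedAll (board : List (List Int)) (x y : Nat) : Prop :=
  ∃ q : Nat × Nat, q.1 < board.length ∧ q.2 < (board.headD []).length ∧
    pvEnt board q.1 q.2 = 1 ∧
    ((x, y) = q ∨ ∃ d ∈ pvDirections,
      pvRayHit board (q.1 : Int) (q.2 : Int) d.1 d.2 x y (pvFuel board))

theorem sc_isValid_iff (board : List (List Int)) (r c : Int) :
    pvIsValid board r c = true ↔ pvCond board r c := by
  simp [pvIsValid, pvCond, and_assoc]

theorem sc_walkGuard_iff (board : List (List Int)) (r c : Int) :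
    (pvInB (board.length : Int) ((board.headD []).length : Int) r c &&
      (pvCellB board r c == 0)) = true ↔ pvCond board r c := by
  simp [pvInB, pvCellB, pvCond, pvGetA, and_assoc]

theorem sc_dims_set1 {R C : Nat} {g : List (List Int)} (h : pvDims R C g) (r c : Int) :
    pvDims R C (pvSet1 g r c) := by
  obtain ⟨hl, hrow⟩ := h
  refine ⟨by simpa [pvSet1] using hl, ?_⟩
  intro row hmem
  unfold pvSet1 at hmem
  by_cases hi : r.toNat < g.length
  · rcases List.mem_or_eq_of_mem_set hmem with h' | h'
    · exact hrow _ h'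
    · subst h'
      rw [List.length_set]
      have hg : g.getD r.toNat [] = g[r.toNat] := by
        simp [List.getD_eq_getElem?_getD, List.getElem?_eq_getElem hi]
      rw [hg]
      exact hrow _ (List.getElem_mem hi)
  · rw [List.set_eq_of_length_le (by omega)] at hmem
    exact hrow _ hmem

theorem sc_ent_set1 {R C : Nat} {g : List (List Int)} (h : pvDims R C g)
    {r c : Int} (hr : 0 ≤ r) (hrR : r < (R : Int)) (hc : 0 ≤ c) (hcC : c < (C : Int))
    (x y : Nat) :
    pvEnt (pvSet1 g r c) x y =
      if (x : Int) = r ∧ (y : Int) = c then 1 else pvEnt g x y := by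
  obtain ⟨hl, hrow⟩ := h
  have hiR : r.toNat < g.length := by omega
  have hg : g.getD r.toNat [] = g[r.toNat] := by
    simp [List.getD_eq_getElem?_getD, List.getElem?_eq_getElem hiR]
  have hrowC : g[r.toNat].length = C := hrow _ (List.getElem_mem hiR)
  have hjC : c.toNat < g[r.toNat].length := by omega
  unfold pvEnt pvSet1
  rw [hg]
  simp only [List.getD_eq_getElem?_getD]
  rw [List.getElem?_set]
  by_cases hx : r.toNat = x
  · rw [if_pos hx, if_pos hiR]
    simp only [Option.getD_some]
    rw [List.getElem?_set]
    by_cases hy : c.toNat = y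
    · rw [if_pos hy, if_pos hjC, if_pos (by omega)]
      rfl
    · rw [if_neg hy, if_neg (by omega)]
      simp [← hx, List.getElem?_eq_getElem hiR]
  · rw [if_neg hx, if_neg (by omega)]

-- every step of a ray/walk that stays on the board bounds the step count
theorem sc_k_le {board : List (List Int)} {d : Int × Int} (hd : d ∈ pvDirections)
    {r c : Int} (hr : 0 ≤ r) (hrR : r < (board.length : Int))
    (hc : 0 ≤ c) (hcC : c < ((board.headD []).length : Int)) {k : Nat}
    (hb : 0 ≤ r + k * d.1 ∧ r + k * d.1 < (board.length : Int) ∧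
          0 ≤ c + k * d.2 ∧ c + k * d.2 < ((board.headD []).length : Int)) :
    k + 1 ≤ pvFuel board := by
  unfold pvFuel
  obtain ⟨h1, h2, h3, h4⟩ := hb
  simp [pvDirections] at hd
  rcases hd with rfl | rfl | rfl | rfl | rfl | rfl | rfl | rfl <;>
    simp only [mul_one, mul_neg_one, mul_zero, add_zero] at h1 h2 h3 h4 <;> omega

theorem sc_ray_dims {board : List (List Int)} {R C : Nat} (dr dc : Int) :
    ∀ (fuel : Nat) (r c : Int) (res : List (List Int)), pvDims R C res →
      pvDims R C (pvRay board dr dc fuel r c res) := by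
  intro fuel
  induction fuel with
  | zero => intro r c res h; simpa [pvRay] using h
  | succ n ih =>
    intro r c res h
    rw [pvRay]
    split
    · exact ih _ _ _ (sc_dims_set1 h _ _)
    · exact h

theorem sc_ray_ent {board : List (List Int)} (dr dc : Int) :
    ∀ (fuel : Nat) (r c : Int) (res : List (List Int)),
      pvDims board.length (board.headD []).length res → ∀ x y : Nat,
      (pvRayHit board r c dr dc x y fuel → pvEnt (pvRay board dr dc fuel r c res) x y = 1) ∧
      (¬ pvRayHit board r c dr dc x y fuel →
        pvEnt (pvRay board dr dc fuel r c res) x y = pvEnt res x y) := by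
  intro fuel
  induction fuel with
  | zero =>
    intro r c res h x y
    refine ⟨?_, fun _ => by simp [pvRay]⟩
    rintro ⟨k, hk1, hk0, -, -, -⟩
    omega
  | succ n ih =>
    intro r c res h x y
    by_cases hg : pvIsValid board (r + dr) (c + dc) = true
    · have hcond : pvCond board (r + dr) (c + dc) := (sc_isValid_iff _ _ _).1 hg
      obtain ⟨hb1, hb2, hb3, hb4, hb5⟩ := hcond
      have hdims' := sc_dims_set1 h (r + dr) (c + dc)
      have IH := ih (r + dr) (c + dc) (pvSet1 res (r + dr) (c + dc)) hdims' x y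
      rw [pvRay, if_pos hg]
      constructor
      · rintro ⟨k, hk1, hkf, hsteps, hx, hy⟩
        by_cases hk : k = 1
        · subst hk
          have hone : pvEnt (pvSet1 res (r + dr) (c + dc)) x y = 1 := by
            rw [sc_ent_set1 h hb1 hb2 hb3 hb4, if_pos]
            constructor
            · rw [hx]; push_cast; ring
            · rw [hy]; push_cast; ring
          by_cases hhit : pvRayHit board (r + dr) (c + dc) dr dc x y n
          · exact IH.1 hhit
          · rw [IH.2 hhit]; exact hone
        · refine IH.1 ⟨k - 1, by omega, by omega, ?_, ?_, ?_⟩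
          · intro j hj1 hjk
            have hs := hsteps (j + 1) (by omega) (by omega)
            have e1 : r + (↑(j + 1) : Int) * dr = (r + dr) + ↑j * dr := by push_cast; ring
            have e2 : c + (↑(j + 1) : Int) * dc = (c + dc) + ↑j * dc := by push_cast; ring
            rw [e1, e2] at hs
            exact hs
          · rw [hx]; push_cast [Nat.cast_sub (by omega : 1 ≤ k)]; ring
          · rw [hy]; push_cast [Nat.cast_sub (by omega : 1 ≤ k)]; ring
      · intro hnot
        have hnot' : ¬ pvRayHit board (r + dr) (c + dc) dr dc x y n := by
          rintro ⟨k, hk1, hkn, hsteps, hx, hy⟩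
          refine hnot ⟨k + 1, by omega, by omega, ?_, ?_, ?_⟩
          · intro j hj1 hjk
            by_cases hj : j = 1
            · subst hj
              constructor
              · simpa [mul_one] using hb1
              all_goals refine ⟨?_, ?_, ?_, ?_⟩ <;> simp only [Nat.cast_one, one_mul] <;>
                first | exact hb2 | exact hb3 | exact hb4 | exact hb5
            · have hs := hsteps (j - 1) (by omega) (by omega)
              have e1 : (r + dr) + (↑(j - 1) : Int) * dr = r + ↑j * dr := by
                push_cast [Nat.cast_sub (by omega : 1 ≤ j)]; ring
              have e2 : (c + dc) + (↑(j - 1) : Int) * dc = c + ↑j * dc := by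
                push_cast [Nat.cast_sub (by omega : 1 ≤ j)]; ring
              rw [e1, e2] at hs
              exact hs
          · rw [hx]; push_cast; ring
          · rw [hy]; push_cast; ring
        rw [IH.2 hnot']
        rw [sc_ent_set1 h hb1 hb2 hb3 hb4, if_neg]
        rintro ⟨hx, hy⟩
        refine hnot ⟨1, le_refl 1, by omega, ?_, by simpa using hx, by simpa using hy⟩
        intro j hj1 hj2
        have hj : j = 1 := by omega
        subst hj
        simpa [mul_one] using ⟨hb1, hb2, hb3, hb4, hb5⟩
    · rw [pvRay, if_neg hg]
      constructor
      · rintro ⟨k, hk1, hkf, hsteps, -, -⟩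
        exact absurd ((sc_isValid_iff _ _ _).2 (by simpa using hsteps 1 (le_refl 1) hk1)) hg
      · intro _; rfl

theorem sc_fold_ray {board : List (List Int)} (r c : Int) :
    ∀ (ds : List (Int × Int)) (res : List (List Int)),
      pvDims board.length (board.headD []).length res →
      pvDims board.length (board.headD []).length
        (ds.foldl (fun res d => pvRay board d.1 d.2 (pvFuel board) r c res) res) ∧
      ∀ x y : Nat,
        ((∃ d ∈ ds, pvRayHit board r c d.1 d.2 x y (pvFuel board)) →
          pvEnt (ds.foldl (fun res d => pvRay board d.1 d.2 (pvFuel board) r c res) res) x y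
            = 1) ∧
        ((∀ d ∈ ds, ¬ pvRayHit board r c d.1 d.2 x y (pvFuel board)) →
          pvEnt (ds.foldl (fun res d => pvRay board d.1 d.2 (pvFuel board) r c res) res) x y
            = pvEnt res x y) := by
  intro ds
  induction ds with
  | nil =>
    intro res h
    exact ⟨h, fun x y => ⟨by rintro ⟨d, hd, -⟩; simp at hd, fun _ => rfl⟩⟩
  | cons d ds ih =>
    intro res h
    simp only [List.foldl_cons]
    have h1 : pvDims board.length (board.headD []).length
        (pvRay board d.1 d.2 (pvFuel board) r c res) := sc_ray_dims d.1 d.2 _ r c res h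
    have IH := ih _ h1
    refine ⟨IH.1, fun x y => ⟨?_, ?_⟩⟩
    · rintro ⟨d', hd', hhit⟩
      rcases List.mem_cons.1 hd' with rfl | hmem
      · have hone : pvEnt (pvRay board d'.1 d'.2 (pvFuel board) r c res) x y = 1 :=
          (sc_ray_ent d'.1 d'.2 _ r c res h x y).1 hhit
        by_cases hrest : ∃ d'' ∈ ds, pvRayHit board r c d''.1 d''.2 x y (pvFuel board)
        · exact (IH.2 x y).1 hrest
        · push Not at hrest
          rw [(IH.2 x y).2 hrest]
          exact hone
      · exact (IH.2 x y).1 ⟨d', hmem, hhit⟩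
    · intro hall
      rw [(IH.2 x y).2 (fun d'' hm => hall d'' (List.mem_cons_of_mem _ hm))]
      exact (sc_ray_ent d.1 d.2 _ r c res h x y).2 (hall d List.mem_cons_self)

theorem sc_mark_dims {board : List (List Int)} {res : List (List Int)}
    (h : pvDims board.length (board.headD []).length res) (r c : Int) :
    pvDims board.length (board.headD []).length (pvMarkReach board res r c) :=
  (sc_fold_ray r c pvDirections res h).1

theorem sc_mark_ent {board : List (List Int)} {res : List (List Int)}
    (h : pvDims board.length (board.headD []).length res) (r c : Int) (x y : Nat) :
    ((∃ d ∈ pvDirections, pvRayHit board r c d.1 d.2 x y (pvFuel board)) →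
        pvEnt (pvMarkReach board res r c) x y = 1) ∧
    ((∀ d ∈ pvDirections, ¬ pvRayHit board r c d.1 d.2 x y (pvFuel board)) →
        pvEnt (pvMarkReach board res r c) x y = pvEnt res x y) :=
  (sc_fold_ray r c pvDirections res h).2 x y

-- A's double loop as a single fold over the list of cells
def pvCells (board : List (List Int)) : List (Nat × Nat) :=
  (List.range board.length).flatMap fun r =>
    (List.range (board.headD []).length).map fun c => (r, c)

def pvStep (board : List (List Int)) (res : List (List Int)) (q : Nat × Nat) :
    List (List Int) :=
  if pvGetA board q.1 q.2 = 1 then pvMarkReach board (pvSet1 res q.1 q.2) q.1 q.2 else res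

theorem sc_mem_cells (board : List (List Int)) (q : Nat × Nat) :
    q ∈ pvCells board ↔ q.1 < board.length ∧ q.2 < (board.headD []).length := by
  rcases q with ⟨a, b⟩
  simp [pvCells, List.mem_flatMap, List.mem_map, List.mem_range, eq_comm]

theorem sc_A_eq_fold (board : List (List Int)) :
    safe_cells board = (pvCells board).foldl (pvStep board)
      (List.replicate board.length
        (List.replicate (board.headD []).length (0 : Int))) := by
  unfold safe_cells pvCells pvStep
  rw [List.foldl_flatMap]
  simp only [List.foldl_map]

-- what one queen q marks at (x, y)
def pvQMark (board : List (List Int)) (q : Nat × Nat) (x y : Nat) : Prop :=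
  pvGetA board (q.1 : Int) (q.2 : Int) = 1 ∧
    ((x, y) = q ∨ ∃ d ∈ pvDirections,
      pvRayHit board (q.1 : Int) (q.2 : Int) d.1 d.2 x y (pvFuel board))

theorem sc_fold_cells {board : List (List Int)} :
    ∀ (l : List (Nat × Nat)) (res : List (List Int)),
      (∀ q ∈ l, q.1 < board.length ∧ q.2 < (board.headD []).length) →
      pvDims board.length (board.headD []).length res →
      pvDims board.length (board.headD []).length (l.foldl (pvStep board) res) ∧
      ∀ x y : Nat,
        ((∃ q ∈ l, pvQMark board q x y) → pvEnt (l.foldl (pvStep board) res) x y = 1) ∧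
        ((∀ q ∈ l, ¬ pvQMark board q x y) →
          pvEnt (l.foldl (pvStep board) res) x y = pvEnt res x y) := by
  intro l
  induction l with
  | nil =>
    intro res hql h
    exact ⟨h, fun x y => ⟨by rintro ⟨q, hq, -⟩; simp at hq, fun _ => rfl⟩⟩
  | cons q l ih =>
    intro res hql h
    obtain ⟨hq1, hq2⟩ := hql q List.mem_cons_self
    simp only [List.foldl_cons]
    by_cases hcell : pvGetA board (q.1 : Int) (q.2 : Int) = 1
    · have hstep : pvStep board res q
          = pvMarkReach board (pvSet1 res (q.1 : Int) (q.2 : Int)) (q.1 : Int) (q.2 : Int) := by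
        simp [pvStep, hcell]
      have hd1 : pvDims board.length (board.headD []).length
          (pvSet1 res (q.1 : Int) (q.2 : Int)) := sc_dims_set1 h _ _
      have hd2 := sc_mark_dims hd1 (q.1 : Int) (q.2 : Int)
      rw [hstep]
      have IH := ih _ (fun q' hm => hql q' (List.mem_cons_of_mem _ hm)) hd2
      refine ⟨IH.1, fun x y => ⟨?_, ?_⟩⟩
      · rintro ⟨q', hq', hmark⟩
        rcases List.mem_cons.1 hq' with rfl | hmem
        · have hone : pvEnt (pvMarkReach board (pvSet1 res (q'.1 : Int) (q'.2 : Int))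
              (q'.1 : Int) (q'.2 : Int)) x y = 1 := by
            rcases hmark.2 with hself | ⟨d, hd, hhit⟩
            · have hx1 : x = q'.1 := by rw [← hself]
              have hy1 : y = q'.2 := by rw [← hself]
              have hx : (x : Int) = (q'.1 : Int) ∧ (y : Int) = (q'.2 : Int) :=
                ⟨by exact_mod_cast hx1, by exact_mod_cast hy1⟩
              have hone1 : pvEnt (pvSet1 res (q'.1 : Int) (q'.2 : Int)) x y = 1 := by
                rw [sc_ent_set1 h (Int.natCast_nonneg _) (by exact_mod_cast hq1)
                  (Int.natCast_nonneg _) (by exact_mod_cast hq2), if_pos hx]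
              by_cases hray : ∃ d ∈ pvDirections,
                  pvRayHit board (q'.1 : Int) (q'.2 : Int) d.1 d.2 x y (pvFuel board)
              · exact (sc_mark_ent hd1 _ _ x y).1 hray
              · push Not at hray
                rw [(sc_mark_ent hd1 _ _ x y).2 hray]
                exact hone1
            · exact (sc_mark_ent hd1 _ _ x y).1 ⟨d, hd, hhit⟩
          by_cases hrest : ∃ q'' ∈ l, pvQMark board q'' x y
          · exact (IH.2 x y).1 hrest
          · push Not at hrest
            rw [(IH.2 x y).2 hrest]
            exact hone
        · exact (IH.2 x y).1 ⟨q', hmem, hmark⟩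
      · intro hall
        rw [(IH.2 x y).2 (fun q'' hm => hall q'' (List.mem_cons_of_mem _ hm))]
        have hq := hall q List.mem_cons_self
        unfold pvQMark at hq
        push Not at hq
        obtain ⟨hnself, hnray⟩ := hq hcell
        rw [(sc_mark_ent hd1 _ _ x y).2 hnray]
        rw [sc_ent_set1 h (Int.natCast_nonneg _) (by exact_mod_cast hq1)
          (Int.natCast_nonneg _) (by exact_mod_cast hq2), if_neg]
        rintro ⟨hx, hy⟩
        exact hnself (by
          have : x = q.1 ∧ y = q.2 := ⟨by exact_mod_cast hx, by exact_mod_cast hy⟩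
          simp [this.1, this.2])
    · have hstep : pvStep board res q = res := by simp [pvStep, hcell]
      rw [hstep]
      have IH := ih _ (fun q' hm => hql q' (List.mem_cons_of_mem _ hm)) h
      refine ⟨IH.1, fun x y => ⟨?_, ?_⟩⟩
      · rintro ⟨q', hq', hmark⟩
        rcases List.mem_cons.1 hq' with rfl | hmem
        · exact absurd hmark.1 hcell
        · exact (IH.2 x y).1 ⟨q', hmem, hmark⟩
      · intro hall
        exact (IH.2 x y).2 (fun q'' hm => hall q'' (List.mem_cons_of_mem _ hm))

theorem sc_res0_ent (board : List (List Int)) (x y : Nat) :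
    pvEnt (List.replicate board.length
      (List.replicate (board.headD []).length (0 : Int))) x y = 0 := by
  unfold pvEnt
  simp only [List.getD_eq_getElem?_getD, List.getElem?_replicate]
  split
  · simp only [Option.getD_some, List.getElem?_replicate]
    split <;> rfl
  · simp

-- characterization of A's result
theorem sc_A_dims (board : List (List Int)) :
    pvDims board.length (board.headD []).length (safe_cells board) := by
  rw [sc_A_eq_fold]
  refine (sc_fold_cells _ _ (fun q hq => (sc_mem_cells board q).1 hq) ⟨?_, ?_⟩).1
  · simp
  · intro row hrow
    rw [List.eq_of_mem_replicate hrow]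
    simp

theorem sc_A_ent (board : List (List Int)) (x y : Nat) :
    (pvMarkedAll board x y → pvEnt (safe_cells board) x y = 1) ∧
    (¬ pvMarkedAll board x y → pvEnt (safe_cells board) x y = 0) := by
  rw [sc_A_eq_fold]
  have hdims0 : pvDims board.length (board.headD []).length
      (List.replicate board.length (List.replicate (board.headD []).length (0 : Int))) := by
    refine ⟨by simp, ?_⟩
    intro row hrow
    rw [List.eq_of_mem_replicate hrow]
    simp
  have H := (sc_fold_cells _ _ (fun q hq => (sc_mem_cells board q).1 hq) hdims0).2 x y
  constructor
  · rintro ⟨q, hq1, hq2, hcell, hcase⟩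
    refine H.1 ⟨q, (sc_mem_cells board q).2 ⟨hq1, hq2⟩, ?_, hcase⟩
    simpa [pvEnt, pvGetA] using hcell
  · intro hnot
    rw [H.2, sc_res0_ent]
    rintro q hq ⟨hcell, hcase⟩
    obtain ⟨hq1, hq2⟩ := (sc_mem_cells board q).1 hq
    exact hnot ⟨q, hq1, hq2, by simpa [pvEnt, pvGetA] using hcell, hcase⟩

-- characterization of B's result
theorem sc_walk_steps {board : List (List Int)} (dr dc : Int) :
    ∀ (fuel : Nat) (rr cc : Int), ∃ k : Nat,
      pvWalk board (board.length : Int) ((board.headD []).length : Int) dr dc fuel rr cc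
        = (rr + k * dr, cc + k * dc) ∧
      ∀ j : Nat, j < k → pvCond board (rr + j * dr) (cc + j * dc) := by
  intro fuel
  induction fuel with
  | zero =>
    intro rr cc
    exact ⟨0, by simp [pvWalk], by omega⟩
  | succ n ih =>
    intro rr cc
    by_cases hg : (pvInB (board.length : Int) ((board.headD []).length : Int) rr cc &&
        (pvCellB board rr cc == 0)) = true
    · have hcond : pvCond board rr cc := (sc_walkGuard_iff board rr cc).1 hg
      obtain ⟨k, hk, hsteps⟩ := ih (rr + dr) (cc + dc)
      refine ⟨k + 1, ?_, ?_⟩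
      · rw [pvWalk, if_pos hg, hk]
        have e1 : (rr + dr) + (k : Int) * dr = rr + (↑(k + 1) : Int) * dr := by
          push_cast; ring
        have e2 : (cc + dc) + (k : Int) * dc = cc + (↑(k + 1) : Int) * dc := by
          push_cast; ring
        rw [e1, e2]
      · intro j hj
        by_cases hj0 : j = 0
        · subst hj0; simpa using hcond
        · have hs := hsteps (j - 1) (by omega)
          have e1 : (rr + dr) + (↑(j - 1) : Int) * dr = rr + ↑j * dr := by
            push_cast [Nat.cast_sub (by omega : 1 ≤ j)]; ring
          have e2 : (cc + dc) + (↑(j - 1) : Int) * dc = cc + ↑j * dc := by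
            push_cast [Nat.cast_sub (by omega : 1 ≤ j)]; ring
          rw [e1, e2] at hs
          exact hs
    · refine ⟨0, ?_, by omega⟩
      rw [pvWalk, if_neg hg]
      simp

theorem sc_walk_eq {board : List (List Int)} (dr dc : Int) (k : Nat) :
    ∀ (fuel : Nat) (rr cc : Int), k ≤ fuel →
      (∀ j : Nat, j < k → pvCond board (rr + j * dr) (cc + j * dc)) →
      ¬ pvCond board (rr + k * dr) (cc + k * dc) →
      pvWalk board (board.length : Int) ((board.headD []).length : Int) dr dc fuel rr cc
        = (rr + k * dr, cc + k * dc) := by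
  induction k with
  | zero =>
    intro fuel rr cc _ _ hnot
    have hg : ¬ (pvInB (board.length : Int) ((board.headD []).length : Int) rr cc &&
        (pvCellB board rr cc == 0)) = true := by
      intro hg
      exact hnot (by simpa using (sc_walkGuard_iff board rr cc).1 hg)
    cases fuel with
    | zero => simp [pvWalk]
    | succ n => rw [pvWalk, if_neg hg]; simp
  | succ k ih =>
    intro fuel rr cc hkf hsteps hnot
    cases fuel with
    | zero => omega
    | succ n =>
      have hcond : pvCond board rr cc := by simpa using hsteps 0 (by omega)
      rw [pvWalk, if_pos ((sc_walkGuard_iff board rr cc).2 hcond)]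
      have e1 : ∀ z d : Int, (z + d) + (k : Int) * d = z + (↑(k + 1) : Int) * d := by
        intro z d; push_cast; ring
      rw [ih n (rr + dr) (cc + dc) (by omega) ?_ ?_]
      · rw [e1 rr dr, e1 cc dc]
      · intro j hj
        have hs := hsteps (j + 1) (by omega)
        have e3 : ∀ z d : Int, z + (↑(j + 1) : Int) * d = (z + d) + ↑j * d := by
          intro z d; push_cast; ring
        rw [e3 rr dr, e3 cc dc] at hs
        exact hs
      · rw [e1 rr dr, e1 cc dc]
        exact hnot

theorem sc_attacked_iff (board : List (List Int)) {r c : Int}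
    (hr : 0 ≤ r) (hrR : r < (board.length : Int))
    (hc : 0 ≤ c) (hcC : c < ((board.headD []).length : Int)) :
    pvAttacked board (board.length : Int) ((board.headD []).length : Int)
        (board.length + (board.headD []).length + 2) r c = true ↔
      ∃ d ∈ pvDirections, pvSees board r c d := by
  rw [pvAttacked, List.any_eq_true]
  have hdl : [((1:Int),(0:Int)), (0,1), (-1,0), (0,-1), (-1,-1), (-1,1), (1,-1), (1,1)]
      = pvDirections := rfl
  rw [hdl]
  constructor
  · rintro ⟨d, hd, hp⟩
    simp only [Bool.and_eq_true, beq_iff_eq, pvInB, decide_eq_true_eq] at hp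
    obtain ⟨⟨⟨⟨hp1, hp2⟩, hp3⟩, hp4⟩, hp5⟩ := hp
    obtain ⟨k, hk, hsteps⟩ := sc_walk_steps d.1 d.2
      (board.length + (board.headD []).length + 2) (r + d.1) (c + d.2)
    rw [hk] at hp1 hp2 hp3 hp4 hp5
    simp only at hp1 hp2 hp3 hp4 hp5
    have e1 : ∀ z dz : Int, (z + dz) + (k : Int) * dz = z + (↑(k + 1) : Int) * dz := by
      intro z dz; push_cast; ring
    rw [e1 r d.1] at hp1 hp2
    rw [e1 c d.2] at hp3 hp4
    rw [e1 r d.1, e1 c d.2] at hp5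
    refine ⟨d, hd, k + 1, by omega, ⟨hp1, hp2, hp3, hp4⟩, by simpa [pvCellB, pvGetA] using hp5, ?_⟩
    intro j hj1 hjk
    have hs := hsteps (j - 1) (by omega)
    have e3 : ∀ z dz : Int, (z + dz) + (↑(j - 1) : Int) * dz = z + ↑j * dz := by
      intro z dz; push_cast [Nat.cast_sub (by omega : 1 ≤ j)]; ring
    rw [e3 r d.1, e3 c d.2] at hs
    exact hs
  · rintro ⟨d, hd, k, hk1, ⟨hb1, hb2, hb3, hb4⟩, hcell, hsteps⟩
    have hkle : k + 1 ≤ pvFuel board := sc_k_le hd hr hrR hc hcC ⟨hb1, hb2, hb3, hb4⟩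
    have hwalk := sc_walk_eq (board := board) d.1 d.2 (k - 1)
      (board.length + (board.headD []).length + 2) (r + d.1) (c + d.2)
      (by unfold pvFuel at hkle; omega) ?_ ?_
    · refine ⟨d, hd, ?_⟩
      simp only [hwalk]
      have e1 : ∀ z dz : Int, (z + dz) + (↑(k - 1) : Int) * dz = z + ↑k * dz := by
        intro z dz; push_cast [Nat.cast_sub (by omega : 1 ≤ k)]; ring
      simp only [Bool.and_eq_true, beq_iff_eq, pvInB, decide_eq_true_eq]
      rw [e1 r d.1, e1 c d.2]
      exact ⟨⟨⟨⟨hb1, hb2⟩, hb3⟩, hb4⟩, by simpa [pvCellB, pvGetA] using hcell⟩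
    · intro j hj
      have hs := hsteps (j + 1) (by omega) (by omega)
      have e3 : ∀ z dz : Int, z + (↑(j + 1) : Int) * dz = (z + dz) + ↑j * dz := by
        intro z dz; push_cast; ring
      rw [e3 r d.1, e3 c d.2] at hs
      exact hs
    · have e1 : ∀ z dz : Int, (z + dz) + (↑(k - 1) : Int) * dz = z + ↑k * dz := by
        intro z dz; push_cast [Nat.cast_sub (by omega : 1 ≤ k)]; ring
      rw [e1 r d.1, e1 c d.2]
      rintro ⟨-, -, -, -, h0⟩
      rw [hcell] at h0
      exact one_ne_zero h0

theorem sc_neg_mem : ∀ d ∈ pvDirections, ((-d.1, -d.2) : Int × Int) ∈ pvDirections := by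
  decide

-- the bridge: A's marked set = B's per-cell predicate (on in-range cells)
theorem sc_bridge (board : List (List Int)) (x y : Nat)
    (hx : x < board.length) (hy : y < (board.headD []).length) :
    pvMarkedAll board x y ↔
      pvEnt board x y = 1 ∨
        (pvEnt board x y = 0 ∧ ∃ d ∈ pvDirections, pvSees board (x : Int) (y : Int) d) := by
  constructor
  · rintro ⟨q, hq1, hq2, hcellq, hcase⟩
    rcases hcase with hself | ⟨d, hd, k, hk1, hkf, hsteps, hxe, hye⟩
    · left
      have h1 : x = q.1 := by rw [← hself]
      have h2 : y = q.2 := by rw [← hself]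
      rw [h1, h2]
      exact hcellq
    · right
      obtain ⟨hc1, hc2, hc3, hc4, hc5⟩ := hsteps k (by omega) (le_refl k)
      rw [← hxe, ← hye] at hc5
      have eq1 : (x : Int) + (k : Int) * (-d.1) = (q.1 : Int) := by rw [hxe]; ring
      have eq2 : (y : Int) + (k : Int) * (-d.2) = (q.2 : Int) := by rw [hye]; ring
      refine ⟨hc5, (-d.1, -d.2), sc_neg_mem d hd, k, hk1, ?_, ?_, ?_⟩
      · show 0 ≤ (x : Int) + (k : Int) * (-d.1) ∧ _
        rw [eq1]
        refine ⟨Int.natCast_nonneg _, ?_⟩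
        show _ < _ ∧ 0 ≤ (y : Int) + (k : Int) * (-d.2) ∧ _
        rw [eq2]
        exact ⟨by exact_mod_cast hq1, Int.natCast_nonneg _, by exact_mod_cast hq2⟩
      · show pvGetA board ((x : Int) + (k : Int) * (-d.1)) ((y : Int) + (k : Int) * (-d.2)) = 1
        rw [eq1, eq2]
        exact hcellq
      · intro j hj1 hjk
        have hs := hsteps (k - j) (by omega) (by omega)
        have e1 : (q.1 : Int) + (↑(k - j) : Int) * d.1 = (x : Int) + ↑j * (-d.1) := by
          rw [hxe]; push_cast [Nat.cast_sub (by omega : j ≤ k)]; ring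
        have e2 : (q.2 : Int) + (↑(k - j) : Int) * d.2 = (y : Int) + ↑j * (-d.2) := by
          rw [hye]; push_cast [Nat.cast_sub (by omega : j ≤ k)]; ring
        rw [e1, e2] at hs
        exact hs
  · rintro (hcell1 | ⟨hcell0, d, hd, k, hk1, ⟨hb1, hb2, hb3, hb4⟩, hcellq, hsteps⟩)
    · exact ⟨(x, y), hx, hy, hcell1, Or.inl rfl⟩
    · have hgx : (((((x : Int) + (k : Int) * d.1)).toNat : Int)) = (x : Int) + (k : Int) * d.1 :=
        Int.toNat_of_nonneg hb1
      have hgy : (((((y : Int) + (k : Int) * d.2)).toNat : Int)) = (y : Int) + (k : Int) * d.2 :=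
        Int.toNat_of_nonneg hb3
      have hq1 : ((x : Int) + (k : Int) * d.1).toNat < board.length := by omega
      have hq2 : ((y : Int) + (k : Int) * d.2).toNat < (board.headD []).length := by omega
      have hkle : k + 1 ≤ pvFuel board :=
        sc_k_le hd (Int.natCast_nonneg x) (by exact_mod_cast hx)
          (Int.natCast_nonneg y) (by exact_mod_cast hy) ⟨hb1, hb2, hb3, hb4⟩
      refine ⟨(((x : Int) + (k : Int) * d.1).toNat, ((y : Int) + (k : Int) * d.2).toNat),
        hq1, hq2, ?_, Or.inr ⟨(-d.1, -d.2), sc_neg_mem d hd, k, hk1, by omega, ?_, ?_, ?_⟩⟩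
      · show pvEnt board _ _ = 1
        unfold pvEnt
        unfold pvGetA at hcellq
        rw [hgx, hgy] at *
        simpa [pvGetA] using hcellq
      · intro j hj1 hjk
        show pvCond board (_ + (j : Int) * (-d.1)) (_ + (j : Int) * (-d.2))
        by_cases hjke : j = k
        · subst hjke
          have e1 : ((((x : Int) + (j : Int) * d.1).toNat : Int)) + (j : Int) * (-d.1)
              = (x : Int) := by rw [hgx]; ring
          have e2 : ((((y : Int) + (j : Int) * d.2).toNat : Int)) + (j : Int) * (-d.2)
              = (y : Int) := by rw [hgy]; ring
          rw [e1, e2]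
          exact ⟨Int.natCast_nonneg _, by exact_mod_cast hx, Int.natCast_nonneg _,
            by exact_mod_cast hy, by simpa [pvGetA, pvEnt] using hcell0⟩
        · have hs := hsteps (k - j) (by omega) (by omega)
          have e1 : (x : Int) + (↑(k - j) : Int) * d.1
              = ((((x : Int) + (k : Int) * d.1).toNat : Int)) + (j : Int) * (-d.1) := by
            rw [hgx]; push_cast [Nat.cast_sub (by omega : j ≤ k)]; ring
          have e2 : (y : Int) + (↑(k - j) : Int) * d.2
              = ((((y : Int) + (k : Int) * d.2).toNat : Int)) + (j : Int) * (-d.2) := by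
            rw [hgy]; push_cast [Nat.cast_sub (by omega : j ≤ k)]; ring
          rw [e1, e2] at hs
          exact hs
      · show (x : Int) = _ + (k : Int) * (-d.1)
        rw [hgx]; ring
      · show (y : Int) = _ + (k : Int) * (-d.2)
        rw [hgy]; ring

-- ===== VERDICT (by name: the statement is the Claim_ definition above) =====
theorem safe_cells_spec : Claim_equal_safe_cells := by
  intro board _ _
  show safe_cells board = safe_cells_alt board
  have hdA := sc_A_dims board
  have haltlen : (safe_cells_alt board).length = board.length := by simp [safe_cells_alt]
  apply List.ext_getElem (by rw [hdA.1, haltlen])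
  intro x hx1 hx2
  have hxR : x < board.length := hdA.1 ▸ hx1
  have hrowlen : (safe_cells board)[x].length = (board.headD []).length :=
    hdA.2 _ (List.getElem_mem hx1)
  have haltrowlen : (safe_cells_alt board)[x].length = (board.headD []).length := by
    simp [safe_cells_alt]
  apply List.ext_getElem (by rw [hrowlen, haltrowlen])
  intro y hy1 hy2
  have hyC : y < (board.headD []).length := hrowlen ▸ hy1
  have hL : (safe_cells board)[x][y] = pvEnt (safe_cells board) x y := by
    unfold pvEnt
    simp only [List.getD_eq_getElem?_getD]
    rw [List.getElem?_eq_getElem hx1, Option.getD_some,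
        List.getElem?_eq_getElem hy1, Option.getD_some]
  have hR : (safe_cells_alt board)[x][y] =
      (if pvCellB board (x : Int) (y : Int) = 1 ∨
          (pvCellB board (x : Int) (y : Int) = 0 ∧
           pvAttacked board (board.length : Int) ((board.headD []).length : Int)
             (board.length + (board.headD []).length + 2) (x : Int) (y : Int) = true)
        then (1 : Int) else 0) := by
    simp [safe_cells_alt, List.getElem_map, List.getElem_range]
  rw [hL, hR]
  have hcellent : pvCellB board (x : Int) (y : Int) = pvEnt board x y := rfl
  have hiff : (pvCellB board (x : Int) (y : Int) = 1 ∨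
      (pvCellB board (x : Int) (y : Int) = 0 ∧
       pvAttacked board (board.length : Int) ((board.headD []).length : Int)
         (board.length + (board.headD []).length + 2) (x : Int) (y : Int) = true)) ↔
      pvMarkedAll board x y := by
    rw [hcellent, sc_attacked_iff board (Int.natCast_nonneg x) (by exact_mod_cast hxR)
      (Int.natCast_nonneg y) (by exact_mod_cast hyC)]
    exact (sc_bridge board x y hxR hyC).symm
  by_cases hm : pvMarkedAll board x y
  · rw [(sc_A_ent board x y).1 hm, if_pos (hiff.2 hm)]
  · rw [(sc_A_ent board x y).2 hm, if_neg (fun hc => hm (hiff.1 hc))]
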